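-- pv_equiv track=rewrite | github.com/BUicicchen/PythonGameProgramming | myLib.py | findNextWord
-- ===== SOURCE A (Python) =====
-- def findNextWord(word, text):
--     '''Find all the words that happen next the given word.
--     :param word: word of interest
--     :param text: the text to study
--     :return: a list with the nextwords
--     '''
--     nextWord = []
--     frequency = []
--     for idx, wrd in enumerate(text):
--         if wrd == word:
--             #find the next words
--             nxtwrd = text[idx+1]
--             if nxtwrd in nextWord:
--                 #find the occurance of each of the next word, add 1 to frequency
--                 frequency[nextWord.index(nxtwrd)]+=1
--             else:
--                 #if not, then the nextword has the frequency of 1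
--                 nextWord.append(nxtwrd)
--                 frequency.append(1)
--     #nextWord, frequency = 0.0, 0.0
--     return nextWord, frequency
-- ===== SOURCE B (Python) =====
-- def findNextWord(word, text):
--     # Two passes: collect the followers, then aggregate counts in first-appearance order.
--     followers = [text[i + 1] for i, w in enumerate(text) if w == word]
--     order = list(dict.fromkeys(followers))
--     return order, [followers.count(w) for w in order]
-- ===== Notes on version B (the rewrite author's own statement) =====
-- stated objective: alternative
-- what changed: A interleaves detection and counting in one scan with list.index bookkeeping; B first collects all follower words in one comprehension pass, then aggregates them (dict.fromkeys for first-appearance order, list.count for frequencies).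
import Mathlib
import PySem

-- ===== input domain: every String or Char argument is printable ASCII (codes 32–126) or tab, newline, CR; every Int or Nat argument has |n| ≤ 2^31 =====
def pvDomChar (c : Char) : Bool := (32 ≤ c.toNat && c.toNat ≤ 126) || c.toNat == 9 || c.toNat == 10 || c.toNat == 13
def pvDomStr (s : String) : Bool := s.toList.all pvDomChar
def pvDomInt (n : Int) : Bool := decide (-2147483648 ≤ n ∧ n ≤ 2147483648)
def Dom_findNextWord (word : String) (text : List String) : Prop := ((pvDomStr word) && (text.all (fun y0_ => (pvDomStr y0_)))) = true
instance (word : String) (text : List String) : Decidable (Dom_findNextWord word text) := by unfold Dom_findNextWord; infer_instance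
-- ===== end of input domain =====

-- B separates the work into two passes (collect followers, then aggregate counts in
-- first-appearance order) where A interleaves detection and counting in one scan; same cost.

-- ===== PORT A =====
-- single scan over enumerate(text), maintaining (nextWord, frequency) exactly as A does
def findNextWord (word : String) (text : List String) : List String × List Int :=
  (PySem.List.enumerate text 0).foldl
    (fun s p =>
      if p.2 == word then
        let nxtwrd := PySem.List.pyGetD text (p.1 + 1) ""   -- text[idx+1]; exclusion of the IndexError is Pre_'s
        if s.1.contains nxtwrd then
          (s.1, s.2.modify ((PySem.List.index? s.1 nxtwrd).getD 0) (· + 1))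
        else
          (s.1 ++ [nxtwrd], s.2 ++ [(1 : Int)])
      else s)
    ([], [])

-- ===== PORT B =====
-- pass 1: the comprehension [text[i+1] for i, w in enumerate(text) if w == word];
-- pass 2: dict.fromkeys order (PySem.List.dedup) and per-word counts
def findNextWord_alt (word : String) (text : List String) : List String × List Int :=
  let followers := (PySem.List.enumerate text 0).filterMap
    (fun p => if p.2 == word then some (PySem.List.pyGetD text (p.1 + 1) "") else none)
  let order := PySem.List.dedup followers
  (order, order.map (fun w => (followers.count w : Int)))

-- ===== PRECONDITION & SPEC =====
-- Pre_ excludes exactly the inputs where Python A raises IndexError (text[idx+1] when the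
-- last token equals word); B's Python raises there too.
def Pre_findNextWord (word : String) (text : List String) : Prop :=
  text.getLast? ≠ some word
instance (word : String) (text : List String) : Decidable (Pre_findNextWord word text) := by
  unfold Pre_findNextWord; infer_instance

def pvWitness_findNextWord : String × List String := ("a", ["a", "b", "a", "b"])

def Spec_findNextWord (word : String) (text : List String) (out : List String × List Int) : Prop := out = findNextWord_alt word text
instance (word : String) (text : List String) (out : List String × List Int) : Decidable (Spec_findNextWord word text out) := by unfold Spec_findNextWord; infer_instance

-- ===== CLAIM (what is proved, stated in full; the proofs are below) =====
def Claim_equal_findNextWord : Prop := ∀ (word : String) (text : List String), Dom_findNextWord word text → Pre_findNextWord word text → Spec_findNextWord word text (findNextWord word text)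

-- ===== LEMMAS AND PROOFS =====

-- A's loop body, applied to an already-extracted follower word
def pvStep (s : List String × List Int) (y : String) : List String × List Int :=
  if s.1.contains y then
    (s.1, s.2.modify ((PySem.List.index? s.1 y).getD 0) (· + 1))
  else
    (s.1 ++ [y], s.2 ++ [(1 : Int)])

-- A's fold over enumerate(text) is the same fold run over B's followers list
theorem findNextWord_eq_fold_followers (word : String) (text : List String) :
    findNextWord word text =
      ((PySem.List.enumerate text 0).filterMap
        (fun p => if p.2 == word then some (PySem.List.pyGetD text (p.1 + 1) "") else none)).foldl
        pvStep ([], []) := by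
  rw [List.foldl_filterMap]
  unfold findNextWord
  congr 1
  funext s p
  by_cases hp : p.2 == word <;> simp [hp, pvStep]

theorem modify_map_middle (pre suf : List String) (y : String) (f : String → Int) (g : Int → Int) :
    (((pre ++ y :: suf)).map f).modify pre.length g = pre.map f ++ g (f y) :: suf.map f := by
  induction pre with
  | nil => simp [List.modify]
  | cons a t ih => simpa [List.modify] using ih

theorem dedup_append_singleton (ys : List String) (y : String) :
    PySem.List.dedup (ys ++ [y]) = PySem.Set.add (PySem.List.dedup ys) y := by
  simp only [PySem.List.dedup_eq_ofList, PySem.Set.ofList_eq_foldl, List.foldl_append,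
    List.foldl_cons, List.foldl_nil]

theorem dedup_append_singleton_mem {ys : List String} {y : String} (h : y ∈ ys) :
    PySem.List.dedup (ys ++ [y]) = PySem.List.dedup ys := by
  rw [dedup_append_singleton]
  simp [PySem.Set.add, h]

theorem dedup_append_singleton_not_mem {ys : List String} {y : String} (h : y ∉ ys) :
    PySem.List.dedup (ys ++ [y]) = PySem.List.dedup ys ++ [y] := by
  rw [dedup_append_singleton]
  simp [PySem.Set.add, h]

-- the fold of A's step over any word list computes (first-appearance dedup, final counts)
theorem fold_pvStep_eq (ys : List String) :
    ys.foldl pvStep ([], []) =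
      (PySem.List.dedup ys, (PySem.List.dedup ys).map (fun w => (ys.count w : Int))) := by
  induction ys using List.reverseRecOn with
  | nil => rfl
  | append_singleton ys y ih =>
    rw [List.foldl_append, ih]
    by_cases hy : y ∈ ys
    · have hmem : y ∈ PySem.List.dedup ys := (PySem.List.mem_dedup ys y).mpr hy
      have hcont : (PySem.List.dedup ys).contains y = true := by
        simpa using hmem
      obtain ⟨j, hj⟩ : ∃ j, PySem.List.index? (PySem.List.dedup ys) y = some j := by
        have := (PySem.List.index?_isSome_iff (PySem.List.dedup ys) y).mpr hmem
        exact Option.isSome_iff_exists.mp this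
      obtain ⟨pre, suf, hdec, hlen, hpre⟩ :=
        (PySem.List.index?_eq_some_iff (PySem.List.dedup ys) y j).mp hj
      have hnd : (PySem.List.dedup ys).Nodup := PySem.List.nodup_dedup ys
      have hsuf : y ∉ suf := by
        rw [hdec] at hnd
        exact (List.nodup_cons.mp (List.nodup_append.mp hnd).2.1).1
      rw [dedup_append_singleton_mem hy]
      simp only [pvStep, hcont, if_pos, hj, Option.getD_some, List.foldl_cons, List.foldl_nil]
      refine Prod.ext rfl ?_
      simp only [hdec, ← hlen, modify_map_middle]
      have hcy : ((ys ++ [y]).count y : Int) = (ys.count y : Int) + 1 := by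
        simp [List.count_append]
      have hne : ∀ w ∈ pre ++ suf, ((ys ++ [y]).count w : Int) = (ys.count w : Int) := by
        intro w hw
        have hwy : w ≠ y := by
          rcases List.mem_append.mp hw with h1 | h2
          · exact fun h => hpre (h ▸ h1)
          · exact fun h => hsuf (h ▸ h2)
        simp [List.count_append, Ne.symm hwy]
      simp only [List.map_append, List.map_cons, hcy]
      rw [List.map_congr_left (fun w hw => hne w (List.mem_append.mpr (Or.inl hw))),
          List.map_congr_left (fun w hw => hne w (List.mem_append.mpr (Or.inr hw)))]
    · have hcont : (PySem.List.dedup ys).contains y = false := by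
        simpa using fun hm => hy ((PySem.List.mem_dedup ys y).mp hm)
      rw [dedup_append_singleton_not_mem hy]
      simp only [pvStep, hcont, Bool.false_eq_true, if_false, List.foldl_cons, List.foldl_nil]
      refine Prod.ext rfl ?_
      have hcy : ((ys ++ [y]).count y : Int) = 1 := by
        simp [List.count_append, List.count_eq_zero_of_not_mem hy]
      have hne : ∀ w ∈ PySem.List.dedup ys, ((ys ++ [y]).count w : Int) = (ys.count w : Int) := by
        intro w hw
        have hwy : w ≠ y := fun h => hy (h ▸ (PySem.List.mem_dedup ys w).mp hw)
        simp [List.count_append, Ne.symm hwy]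
      simp only [List.map_append, List.map_cons, List.map_nil, hcy]
      rw [List.map_congr_left hne]

-- ===== VERDICT (by name: the statement is the Claim_ definition above) =====
theorem findNextWord_spec : Claim_equal_findNextWord := by
  intro word text _ _
  unfold Spec_findNextWord findNextWord_alt
  rw [findNextWord_eq_fold_followers, fold_pvStep_eq]
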